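-- pv_equiv track=rewrite | github.com/northeastern-datalab/HITSnDIFFS | methods/hits.py | getLists
-- ===== SOURCE A (Python) =====
-- def getLists(Labels, M, N, K):
--     """
--     Get the lists for iterations. These two lists store the options chosen by each student and the students who chose each option
--
--     Parameters
--     ----------
--     Labels : matrix (2-dimensional array)
--         A matrix to store all the annotations for all questions from all students
--         Labels[j][i] = -1 means student j didn't answer question i
--         Labels[j][i] = k, k = 0, 1, ..., means student j chose option k for question i
--     M : int, student number
--     N : int, question number
--     K : int, option number for each question
--
--     Returns
--     -------
--     s_list : list
--         A list to store the options chosen by each student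
--     a_list : list
--         A list to store the students who chose each option
--     """
--     s_list = []
--     a_list = []
--     for i in range(0, N * K):
--         l = []
--         a_list.append(l)
--     for j in range(0, M):
--         l = []
--         for i in range(0, N):
--             if Labels[j][i] != -1:
--                 l.append(int(i * K + Labels[j][i]))
--                 a_list[int(i * K + Labels[j][i])].append(j)
--         s_list.append(l)
--     return s_list, a_list
-- ===== SOURCE B (Python) =====
-- def getLists(Labels, M, N, K):
--     # s_list: row scan; a_list: option-major scan decoding slot t into (question t//K, option t%K)
--     s_list = [[int(i * K + Labels[j][i]) for i in range(N) if Labels[j][i] != -1]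
--               for j in range(M)]
--     a_list = [[j for j in range(M) if Labels[j][t // K] == t % K]
--               for t in range(N * K)]
--     return s_list, a_list
-- ===== Notes on version B (the rewrite author's own statement) =====
-- stated objective: alternative
-- what changed: B computes a_list option-major: each slot t is arithmetically decoded into (question t//K, option t%K) and the students are scanned with that membership predicate, instead of A's event-driven appends into a preallocated table while scanning Labels row-major; s_list is a direct row comprehension.
-- outside the precondition, e.g. on getLists([[-3]], 1, 1, 3): A returns ([[-3]], [[0], [], []]), B returns ([[-3]], [[], [], []]); on getLists([[0]], 1, -1, -2): A returns ([[]], [[], []]), B returns ([[]], [[0], []])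
import Mathlib
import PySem

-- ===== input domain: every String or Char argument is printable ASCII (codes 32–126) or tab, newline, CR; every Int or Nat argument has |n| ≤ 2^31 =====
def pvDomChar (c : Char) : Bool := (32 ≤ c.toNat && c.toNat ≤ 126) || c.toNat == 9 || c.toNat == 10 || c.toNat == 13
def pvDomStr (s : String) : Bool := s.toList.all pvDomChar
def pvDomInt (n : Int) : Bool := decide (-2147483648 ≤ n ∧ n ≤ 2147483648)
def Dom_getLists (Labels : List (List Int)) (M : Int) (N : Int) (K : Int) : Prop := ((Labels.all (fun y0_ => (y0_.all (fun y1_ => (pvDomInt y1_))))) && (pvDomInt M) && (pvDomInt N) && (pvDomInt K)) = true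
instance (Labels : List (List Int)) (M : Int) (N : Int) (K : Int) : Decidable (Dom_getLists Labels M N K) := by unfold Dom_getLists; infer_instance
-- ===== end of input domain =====

-- B computes a_list option-major by decoding each slot t into (question t//K, option t%K) and
-- scanning the students with that predicate, instead of A's appends into a preallocated table.

-- shared primitive: Python's `a[idx].append(j)` on a list of lists
def pyAppendAt (a : List (List Int)) (idx : Int) (j : Int) : List (List Int) :=
  PySem.List.pySetD a idx (PySem.List.pyGetD a idx [] ++ [j])

-- ===== PORT A =====
def getLists (Labels : List (List Int)) (M : Int) (N : Int) (K : Int) : List (List Int) × List (List Int) :=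
  let a_list0 : List (List Int) :=
    (PySem.List.pyRange 0 (N * K) 1).foldl (fun a _ => a ++ [([] : List Int)]) []
  (PySem.List.pyRange 0 M 1).foldl
    (fun (st : List (List Int) × List (List Int)) j =>
      let r := (PySem.List.pyRange 0 N 1).foldl
        (fun (p : List Int × List (List Int)) i =>
          let v := PySem.List.pyGetD (PySem.List.pyGetD Labels j []) i 0
          if v ≠ -1 then (p.1 ++ [i * K + v], pyAppendAt p.2 (i * K + v) j) else p)
        (([] : List Int), st.2)
      (st.1 ++ [r.1], r.2))
    (([] : List (List Int)), a_list0)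

-- ===== PORT B =====
def getLists_alt (Labels : List (List Int)) (M : Int) (N : Int) (K : Int) : List (List Int) × List (List Int) :=
  let s_list : List (List Int) :=
    (PySem.List.pyRange 0 M 1).map (fun j =>
      ((PySem.List.pyRange 0 N 1).filter
          (fun i => PySem.List.pyGetD (PySem.List.pyGetD Labels j []) i 0 ≠ -1)).map
        (fun i => i * K + PySem.List.pyGetD (PySem.List.pyGetD Labels j []) i 0))
  let a_list : List (List Int) :=
    (PySem.List.pyRange 0 (N * K) 1).map (fun t =>
      (PySem.List.pyRange 0 M 1).filter (fun j =>
        PySem.List.pyGetD (PySem.List.pyGetD Labels j []) (PySem.Int.floordiv t K) 0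
          = PySem.Int.mod t K))
  (s_list, a_list)

-- ===== PRECONDITION & SPEC =====
-- Pre_ restricts to the function's natural domain and to inputs where Python A returns: when
-- cells are scanned (0 < M and 0 < N), the option count K is nonnegative, the first M rows are
-- present and at least N long, and every answered label is a valid option in 0..K-1 (with
-- 0 < M, N ≤ 0 the count K must still be nonnegative).  It thereby also excludes some inputs
-- on which A still returns — malformed labels whose encoding i*K+label happens to land in
-- [-N*K, N*K) (negative-index wraparound / slot collisions) and negative counts N, K with
-- M > 0 — which are outside the documented annotation format.
def Pre_getLists (Labels : List (List Int)) (M : Int) (N : Int) (K : Int) : Prop :=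
  M ≤ 0 ∨ (N ≤ 0 ∧ 0 ≤ K) ∨
  (0 < N ∧ 0 ≤ K ∧ M ≤ (Labels.length : Int) ∧
  ∀ j ∈ PySem.List.pyRange 0 M 1,
    N ≤ ((PySem.List.pyGetD Labels j []).length : Int) ∧
    ∀ i ∈ PySem.List.pyRange 0 N 1,
      PySem.List.pyGetD (PySem.List.pyGetD Labels j []) i 0 = -1 ∨
      (0 ≤ PySem.List.pyGetD (PySem.List.pyGetD Labels j []) i 0 ∧
       PySem.List.pyGetD (PySem.List.pyGetD Labels j []) i 0 < K))
instance (Labels : List (List Int)) (M : Int) (N : Int) (K : Int) : Decidable (Pre_getLists Labels M N K) := by unfold Pre_getLists; infer_instance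
def pvWitness_getLists : List (List Int) × Int × Int × Int := ([[0, -1], [1, 0]], 2, 2, 2)
def Spec_getLists (Labels : List (List Int)) (M : Int) (N : Int) (K : Int) (out : List (List Int) × List (List Int)) : Prop := out = getLists_alt Labels M N K
instance (Labels : List (List Int)) (M : Int) (N : Int) (K : Int) (out : List (List Int) × List (List Int)) : Decidable (Spec_getLists Labels M N K out) := by unfold Spec_getLists; infer_instance

-- ===== CLAIM (what is proved, stated in full; the proofs are below) =====
def Claim_equal_getLists : Prop := ∀ (Labels : List (List Int)) (M : Int) (N : Int) (K : Int), Dom_getLists Labels M N K → Pre_getLists Labels M N K → Spec_getLists Labels M N K (getLists Labels M N K)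

-- ===== LEMMAS AND PROOFS =====

-- the option list of student j (the value both programs compute per row)
def pvRow (Labels : List (List Int)) (N : Int) (K : Int) (j : Int) : List Int :=
  ((PySem.List.pyRange 0 N 1).filter
      (fun i => PySem.List.pyGetD (PySem.List.pyGetD Labels j []) i 0 ≠ -1)).map
    (fun i => i * K + PySem.List.pyGetD (PySem.List.pyGetD Labels j []) i 0)

-- B's per-slot predicate
def pvPred (Labels : List (List Int)) (K : Int) (t : Int) (j : Int) : Bool :=
  PySem.List.pyGetD (PySem.List.pyGetD Labels j []) (PySem.Int.floordiv t K) 0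
    = PySem.Int.mod t K

-- well-formed row j: every scanned label is -1 or a valid option
def pvWf (Labels : List (List Int)) (N : Int) (K : Int) (j : Int) : Prop :=
  ∀ i ∈ PySem.List.pyRange 0 N 1,
    PySem.List.pyGetD (PySem.List.pyGetD Labels j []) i 0 = -1 ∨
    (0 ≤ PySem.List.pyGetD (PySem.List.pyGetD Labels j []) i 0 ∧
     PySem.List.pyGetD (PySem.List.pyGetD Labels j []) i 0 < K)

-- A's inner loop over any index list produces the filter-map row and the matching a_list updates
theorem pv_inner (Labels : List (List Int)) (K : Int) (j : Int) :
    ∀ (L : List Int) (acc : List Int) (a : List (List Int)),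
    L.foldl
      (fun (p : List Int × List (List Int)) i =>
        let v := PySem.List.pyGetD (PySem.List.pyGetD Labels j []) i 0
        if v ≠ -1 then (p.1 ++ [i * K + v], pyAppendAt p.2 (i * K + v) j) else p)
      (acc, a)
    = (acc ++ (L.filter (fun i => PySem.List.pyGetD (PySem.List.pyGetD Labels j []) i 0 ≠ -1)).map
          (fun i => i * K + PySem.List.pyGetD (PySem.List.pyGetD Labels j []) i 0),
       ((L.filter (fun i => PySem.List.pyGetD (PySem.List.pyGetD Labels j []) i 0 ≠ -1)).map
          (fun i => i * K + PySem.List.pyGetD (PySem.List.pyGetD Labels j []) i 0)).foldl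
         (fun a opt => pyAppendAt a opt j) a) := by
  intro L
  induction L with
  | nil => intro acc a; simp
  | cons x xs ih =>
    intro acc a
    simp only [List.foldl_cons]
    by_cases hx : PySem.List.pyGetD (PySem.List.pyGetD Labels j []) x 0 ≠ -1
    · rw [if_pos hx, ih]
      simp [hx]
    · rw [if_neg hx, ih]
      simp [not_not.mp hx]

-- A's outer loop over any j-list: s_list is the map of rows, a_list is the fold of row updates
theorem pv_outer (Labels : List (List Int)) (N : Int) (K : Int) :
    ∀ (Js : List Int) (s : List (List Int)) (a : List (List Int)),
    Js.foldl
      (fun (st : List (List Int) × List (List Int)) j =>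
        let r := (PySem.List.pyRange 0 N 1).foldl
          (fun (p : List Int × List (List Int)) i =>
            let v := PySem.List.pyGetD (PySem.List.pyGetD Labels j []) i 0
            if v ≠ -1 then (p.1 ++ [i * K + v], pyAppendAt p.2 (i * K + v) j) else p)
          (([] : List Int), st.2)
        (st.1 ++ [r.1], r.2))
      (s, a)
    = (s ++ Js.map (pvRow Labels N K),
       Js.foldl (fun a j => (pvRow Labels N K j).foldl (fun a opt => pyAppendAt a opt j) a) a) := by
  intro Js
  induction Js with
  | nil => intro s a; simp
  | cons x xs ih =>
    intro s a
    simp only [List.foldl_cons, List.map_cons]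
    rw [pv_inner Labels K x (PySem.List.pyRange 0 N 1) [] a, ih]
    simp [pvRow]

-- the initial a_list is a map of empties
theorem pv_init (L : List Int) :
    ∀ (init : List (List Int)),
    L.foldl (fun a _ => a ++ [([] : List Int)]) init = init ++ L.map (fun _ => ([] : List Int)) := by
  induction L with
  | nil => intro init; simp
  | cons x xs ih => intro init; simp [ih]

-- one append at an in-range slot, on a table given as a map over the slot range
theorem pv_append_one (L : Int) (f : Int → List Int) (o j : Int) (h0 : 0 ≤ o) (h1 : o < L) :
    pyAppendAt ((PySem.List.pyRange 0 L 1).map f) o j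
      = (PySem.List.pyRange 0 L 1).map (fun t => if t = o then f t ++ [j] else f t) := by
  unfold pyAppendAt
  rw [PySem.List.pyGetD_map_pyRange_of_nonneg f L o [] h0 h1]
  rw [PySem.List.pySetD_of_nonneg _ _ h0]
  apply List.ext_getElem
  · simp
  · intro n hn1 hn2
    have hlen : n < (L).toNat := by
      simpa [PySem.List.length_pyRange_one] using hn2
    rw [List.getElem_set]
    simp only [List.getElem_map, PySem.List.getElem_pyRange_one]
    split_ifs with h1' h2' h3'
    · simp [← h2']
    · exact absurd (by omega : (0 : Int) + (n : Int) = o) h2'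
    · exact absurd (by omega : o.toNat = n) h1'
    · simp

-- folding appends of distinct in-range slots over a mapped table
theorem pv_fold_slots (L j : Int) :
    ∀ (O : List Int) (f : Int → List Int), O.Nodup → (∀ o ∈ O, 0 ≤ o ∧ o < L) →
    O.foldl (fun a o => pyAppendAt a o j) ((PySem.List.pyRange 0 L 1).map f)
      = (PySem.List.pyRange 0 L 1).map (fun t => if t ∈ O then f t ++ [j] else f t) := by
  intro O
  induction O with
  | nil => intro f _ _; simp
  | cons o Os ih =>
    intro f hnd hbd
    have hb := hbd o (List.mem_cons_self ..)
    simp only [List.foldl_cons]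
    rw [pv_append_one L f o j hb.1 hb.2]
    rw [ih _ (List.nodup_cons.mp hnd).2 (fun x hx => hbd x (List.mem_cons_of_mem _ hx))]
    apply List.map_congr_left
    intro t _
    have hno : o ∉ Os := (List.nodup_cons.mp hnd).1
    by_cases h1 : t ∈ Os
    · have : t ≠ o := fun h => hno (h ▸ h1)
      simp [h1, this, List.mem_cons]
    · by_cases h2 : t = o <;> simp [h1, h2, hno, List.mem_cons]

-- decode: membership of slot t in row j equals B's predicate (for t in the slot range)
theorem pv_decode (Labels : List (List Int)) (N K : Int) (j t : Int)
    (hw : pvWf Labels N K j) (hK : 0 ≤ K) (h0 : 0 ≤ t) (h1 : t < N * K) :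
    (t ∈ pvRow Labels N K j) ↔ pvPred Labels K t j = true := by
  have hKpos : 0 < K := by
    rcases hK.lt_or_eq with h | h
    · exact h
    · exfalso; rw [← h] at h1; nlinarith
  constructor
  · intro ht
    unfold pvRow at ht
    rcases List.mem_map.mp ht with ⟨i, hi, hei⟩
    rcases List.mem_filter.mp hi with ⟨hir, hne⟩
    have hirange := PySem.List.mem_pyRange_one.mp hir
    rcases hw i hir with h | h
    · exact absurd h (by simpa using hne)
    · -- t = i*K + v with 0 ≤ v < K, so t//K = i and t%K = v
      set v := PySem.List.pyGetD (PySem.List.pyGetD Labels j []) i 0 with hv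
      have hdiv : PySem.Int.floordiv t K = i := by
        rw [PySem.Int.floordiv_eq_iff_of_pos hKpos]
        constructor <;> nlinarith
      have hmod : PySem.Int.mod t K = v := by
        have := PySem.Int.floordiv_mul_add_mod t K
        rw [hdiv] at this
        nlinarith
      unfold pvPred
      rw [hdiv, hmod]
      simp [← hv]
  · intro hp
    unfold pvPred at hp
    set q := PySem.Int.floordiv t K with hq
    have hq0 : 0 ≤ q := by
      rw [hq, PySem.Int.le_floordiv_iff_mul_le hKpos]
      simpa using h0
    have hqN : q < N := by
      rw [hq, PySem.Int.floordiv_lt_iff_lt_mul hKpos]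
      linarith [h1]
    have hqr : q ∈ PySem.List.pyRange 0 N 1 := PySem.List.mem_pyRange_one.mpr ⟨hq0, hqN⟩
    have hsum := PySem.Int.floordiv_mul_add_mod t K
    have hr0 : 0 ≤ PySem.Int.mod t K := by
      rw [PySem.Int.mod_eq_emod_of_pos hKpos]; exact Int.emod_nonneg t (by omega)
    have hv : PySem.List.pyGetD (PySem.List.pyGetD Labels j []) q 0 = PySem.Int.mod t K :=
      by simpa using hp
    have hne : PySem.List.pyGetD (PySem.List.pyGetD Labels j []) q 0 ≠ -1 := by
      rw [hv]; omega
    unfold pvRow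
    refine List.mem_map.mpr ⟨q, List.mem_filter.mpr ⟨hqr, by simpa using hne⟩, ?_⟩
    rw [hv, hq]
    exact hsum

-- row slots are strictly increasing, hence distinct, and lie in [0, N*K)
theorem pv_row_nodup (Labels : List (List Int)) (N K : Int) (j : Int)
    (hw : pvWf Labels N K j) (hK : 0 ≤ K) : (pvRow Labels N K j).Nodup := by
  unfold pvRow
  apply List.Pairwise.imp (fun {a b : Int} (h : a < b) => Int.ne_of_lt h)
  rw [List.pairwise_map]
  apply List.Pairwise.imp_of_mem (R := fun a b => a < b)
  · intro a b ha hb hab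
    have ha' := hw a (List.mem_filter.mp ha).1
    have hb' := hw b (List.mem_filter.mp hb).1
    have hane : PySem.List.pyGetD (PySem.List.pyGetD Labels j []) a 0 ≠ -1 := by
      simpa using (List.mem_filter.mp ha).2
    have hbne : PySem.List.pyGetD (PySem.List.pyGetD Labels j []) b 0 ≠ -1 := by
      simpa using (List.mem_filter.mp hb).2
    rcases ha' with h | h
    · exact absurd h hane
    rcases hb' with h' | h'
    · exact absurd h' hbne
    nlinarith
  · exact List.Pairwise.filter _ (PySem.List.pairwise_lt_pyRange_one 0 N)

theorem pv_row_bounds (Labels : List (List Int)) (N K : Int) (j : Int)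
    (hw : pvWf Labels N K j) (hK : 0 ≤ K) :
    ∀ o ∈ pvRow Labels N K j, 0 ≤ o ∧ o < N * K := by
  intro o ho
  unfold pvRow at ho
  rcases List.mem_map.mp ho with ⟨i, hi, hei⟩
  rcases List.mem_filter.mp hi with ⟨hir, hne⟩
  have hirange := PySem.List.mem_pyRange_one.mp hir
  rcases hw i hir with h | h
  · exact absurd h (by simpa using hne)
  · constructor <;> nlinarith

-- the outer a_list fold equals B's option-major table
theorem pv_main (Labels : List (List Int)) (N K : Int) (hK : 0 ≤ K) :
    ∀ (Js : List Int) (f : Int → List Int), (∀ j ∈ Js, pvWf Labels N K j) →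
    Js.foldl (fun a j => (pvRow Labels N K j).foldl (fun a opt => pyAppendAt a opt j) a)
        ((PySem.List.pyRange 0 (N * K) 1).map f)
      = (PySem.List.pyRange 0 (N * K) 1).map
          (fun t => f t ++ Js.filter (fun j => pvPred Labels K t j)) := by
  intro Js
  induction Js with
  | nil => intro f _; simp
  | cons j Js ih =>
    intro f hwf
    have hwj := hwf j (List.mem_cons_self ..)
    simp only [List.foldl_cons]
    rw [pv_fold_slots (N * K) j (pvRow Labels N K j) f
        (pv_row_nodup Labels N K j hwj hK) (pv_row_bounds Labels N K j hwj hK)]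
    rw [ih _ (fun x hx => hwf x (List.mem_cons_of_mem _ hx))]
    apply List.map_congr_left
    intro t htr
    have htb := PySem.List.mem_pyRange_one.mp htr
    have hdec := pv_decode Labels N K j t hwj hK (by simpa using htb.1) (by simpa using htb.2)
    rw [List.filter_cons]
    by_cases hp : pvPred Labels K t j = true
    · rw [if_pos (hdec.mpr hp), if_pos hp]
      simp
    · rw [if_neg (fun h => hp (hdec.mp h)), if_neg hp]

-- ===== VERDICT (by name: the statement is the Claim_ definition above) =====
theorem pv_equal_of_wf (Labels : List (List Int)) (M N K : Int) (hK : 0 ≤ K)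
    (hwf : ∀ j ∈ PySem.List.pyRange 0 M 1, pvWf Labels N K j) :
    getLists Labels M N K = getLists_alt Labels M N K := by
  unfold getLists getLists_alt
  rw [pv_init, pv_outer Labels N K, List.nil_append]
  simp only [List.nil_append]
  rw [pv_main Labels N K hK (PySem.List.pyRange 0 M 1) (fun _ => []) hwf]
  simp only [List.nil_append]
  rfl

theorem getLists_spec : Claim_equal_getLists := by
  intro Labels M N K _ hpre
  unfold Spec_getLists
  rcases hpre with hM | ⟨hN, hK⟩ | ⟨_, hK, _, hrows⟩
  · unfold getLists getLists_alt
    rw [PySem.List.pyRange_one_eq_nil hM]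
    simp
  · exact pv_equal_of_wf Labels M N K hK (fun j _ i hi => by
      rw [PySem.List.pyRange_one_eq_nil hN] at hi; cases hi)
  · exact pv_equal_of_wf Labels M N K hK (fun j hj => (hrows j hj).2)
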